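/- GENERATED by tools/from_farm_form.py from prooffarm-gif/accepted/gif_decode.2/Proof.lean (a worked proof of the farm's unit `gif_decode.2`,
   accepted by the verdict) — do not edit. -/
import Gif.Spec.Units.gif_decode_2
import Gif.Spec.AllSegs
import Gif.Spec.Proved.gif_decode_2_Lemmas

open X86 X86.User Asan ProgX.Base ProgX.Base.Spec Gif.Spec

/-!
  `gif_decode.2` (0x10aeb3 … 0x10aedd and 0x10b000 … 0x10b027, 19 instructions; gif_driver.c:199-206): THE READER IS MADE. A body
  segment of a protected function that calls a contract function (DGifOpen) WITHOUT A FOREST: its pre is the heap's `HeapPre`, the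
  context with the cursor as an object of the OWN frame, the cursor as just stored, the constants, `&error` of the own frame. The
  call's return address 0x10aed4 (`ret14`) is a private cut (`gd2_AtRet14`); two walks (Lemmas.lean), chained here.
-/

/-- Segment 2 of `gif_decode` takes `Filled` at 0x10aeb3 to `AfterOpen` at 0x10aedd or to `Done` at 0x10afdb. -/
theorem Gif.Spec.Proved.gif_decode_2_ok : Gif.Spec.gif_decode_2.Statement := by
  intro Lay hLay μ hμ u₀ hcode h_DGifOpen h_asan_store4_noabort h_asan_store8_noabort H rest frames e ret v hat
  -- DGifOpen's contract for the entry's heap, the frame list of the body (the own frame in front) and THE READER OF THIS FRAME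
  have hopen := h_DGifOpen H rest (gif_decode.framesIn frames e) (gif_decode.reader e)
  -- 0x10aeb3 … the call … 0x10aed4
  refine (Gif.Spec.gif_decode_2.gd2_seg_call Lay hLay μ hμ u₀ hcode H rest frames e ret hopen v hat).trans ?_
  -- 0x10aed4 … 0x10aedd / 0x10afdb
  intro v1 hv1
  exact Gif.Spec.gif_decode_2.gd2_seg_tail Lay hLay μ hμ u₀ hcode H rest frames e ret h_asan_store4_noabort
    h_asan_store8_noabort v1 hv1
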